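-- pv_equiv track=rewrite | github.com/quaner2557/ovs-pp | 1_clean_data.py | replace_ith_quote_after_keyword
-- ===== SOURCE A (Python) =====
-- def replace_ith_quote_after_keyword(input_string, keyword, ith):
--     # 查找关键字在字符串中的位置
--     keyword_pos = input_string.find(keyword)
--     if keyword_pos == -1:
--         # 如果关键字不在字符串中，返回原始字符串
--         return input_string
--
--     # 从关键字位置开始查找第 ith 个双引号
--     quote_count = 0
--     for i in range(keyword_pos, len(input_string)):
--         if input_string[i] == '"':
--             quote_count += 1
--             if quote_count == ith:
--                 # 找到第 ith 个双引号，替换成单引号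
--                 return input_string[:i] + "'" + input_string[i + 1:]
--
--     # 如果找不到足够的双引号，返回原始字符串
--     return input_string
-- ===== SOURCE B (Python) =====
-- def replace_ith_quote_after_keyword(input_string, keyword, ith):
--     keyword_pos = input_string.find(keyword)
--     if keyword_pos == -1:
--         return input_string
--     head, tail = input_string[:keyword_pos], input_string[keyword_pos:]
--     parts = tail.split('"')
--     if not (1 <= ith <= len(parts) - 1):
--         return input_string
--     # the ith '"' separator becomes a "'"
--     return head + '"'.join(parts[:ith]) + "'" + '"'.join(parts[ith:])
-- ===== Notes on version B (the rewrite author's own statement) =====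
-- stated objective: alternative
-- what changed: B splits the substring from the keyword into the segments between double quotes with str.split('"') and rebuilds the string by rejoining the first ith segments, a single quote, and the remaining segments, instead of A's index-counting scan and slice at the found index.
import Mathlib
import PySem

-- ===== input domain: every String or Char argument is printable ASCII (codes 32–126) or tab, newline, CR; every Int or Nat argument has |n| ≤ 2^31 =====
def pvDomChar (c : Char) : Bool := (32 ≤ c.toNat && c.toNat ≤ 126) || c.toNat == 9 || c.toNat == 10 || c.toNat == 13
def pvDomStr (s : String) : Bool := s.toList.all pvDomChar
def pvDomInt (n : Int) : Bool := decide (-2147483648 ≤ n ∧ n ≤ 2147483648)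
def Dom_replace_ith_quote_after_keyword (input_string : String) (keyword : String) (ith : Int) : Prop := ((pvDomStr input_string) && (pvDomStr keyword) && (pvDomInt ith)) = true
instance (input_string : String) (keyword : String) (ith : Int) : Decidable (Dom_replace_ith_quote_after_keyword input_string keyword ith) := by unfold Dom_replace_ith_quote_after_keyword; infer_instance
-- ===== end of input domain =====

-- B splits the tail starting at the keyword into the segments between double quotes and rejoins
-- them with the ith separator turned into a single quote; A counts quotes in an index scan with
-- an early return. Same return value everywhere (A is total).

-- ===== PORT A =====
-- the 'for i in range(keyword_pos, len(input_string))' loop with early return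
def pvGoA (cs : List Char) (orig : String) (idxs : List Int) (quote_count : Int) (ith : Int) : String :=
  match idxs with
  | [] => orig
  | i :: rest =>
    if PySem.List.pyGet? cs i == some '"' then
      let quote_count := quote_count + 1
      if quote_count = ith then
        String.ofList (PySem.List.slice cs none (some i) ++ ['\''] ++ PySem.List.slice cs (some (i + 1)) none)
      else pvGoA cs orig rest quote_count ith
    else pvGoA cs orig rest quote_count ith

def replace_ith_quote_after_keyword (input_string : String) (keyword : String) (ith : Int) : String :=
  let keyword_pos := PySem.Str.find input_string keyword
  if keyword_pos = -1 then input_string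
  else
    let cs := input_string.toList
    pvGoA cs input_string (PySem.List.pyRange keyword_pos cs.length 1) 0 ith

-- ===== PORT B =====
def replace_ith_quote_after_keyword_alt (input_string : String) (keyword : String) (ith : Int) : String :=
  let keyword_pos := PySem.Str.find input_string keyword
  if keyword_pos = -1 then input_string
  else
    let cs := input_string.toList
    let head := PySem.List.slice cs none (some keyword_pos)
    let tail := PySem.List.slice cs (some keyword_pos) none
    let parts := PySem.Chars.splitOn tail ['"']
    if 1 ≤ ith ∧ ith ≤ (parts.length : Int) - 1 then
      String.ofList (head ++
        PySem.Chars.join ['"'] (PySem.List.slice parts none (some ith)) ++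
        '\'' :: PySem.Chars.join ['"'] (PySem.List.slice parts (some ith) none))
    else input_string

-- ===== PRECONDITION & SPEC =====
def Spec_replace_ith_quote_after_keyword (input_string : String) (keyword : String) (ith : Int) (out : String) : Prop := out = replace_ith_quote_after_keyword_alt input_string keyword ith
instance (input_string : String) (keyword : String) (ith : Int) (out : String) : Decidable (Spec_replace_ith_quote_after_keyword input_string keyword ith out) := by unfold Spec_replace_ith_quote_after_keyword; infer_instance

-- ===== CLAIM =====
def Claim_equal_replace_ith_quote_after_keyword : Prop := ∀ (input_string : String) (keyword : String) (ith : Int), Dom_replace_ith_quote_after_keyword input_string keyword ith → Spec_replace_ith_quote_after_keyword input_string keyword ith (replace_ith_quote_after_keyword input_string keyword ith)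

-- ===== LEMMAS AND PROOFS =====

-- proof-side model of Python split('"') on a char list
def mySplit : List Char → List (List Char)
  | [] => [[]]
  | c :: t =>
    if c = '"' then [] :: mySplit t
    else
      match mySplit t with
      | [] => [[c]]          -- unreachable: mySplit is never []
      | h :: tl => (c :: h) :: tl

-- the (0-based) positions of '"' in a char list
def qpos : List Char → List Nat
  | [] => []
  | c :: t => if c = '"' then 0 :: (qpos t).map (· + 1) else (qpos t).map (· + 1)

lemma mySplit_ne_nil (t : List Char) : mySplit t ≠ [] := by
  cases t with
  | nil => simp [mySplit]
  | cons c r =>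
    unfold mySplit
    split_ifs
    · simp
    · rcases h : mySplit r with _ | ⟨h₁, tl⟩ <;> simp

lemma mySplit_length (t : List Char) : (mySplit t).length = (qpos t).length + 1 := by
  induction t with
  | nil => simp [mySplit, qpos]
  | cons c r ih =>
    unfold mySplit qpos
    split_ifs
    · simp [ih]
    · rcases h : mySplit r with _ | ⟨h₁, tl⟩
      · exact absurd h (mySplit_ne_nil r)
      · simp [← ih, h]

-- PySem.Chars.splitOn.go equals the accumulator-free model
lemma go_eq (fuel : Nat) (l cur : List Char) (acc : List (List Char)) (h : l.length ≤ fuel)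
    (hd : List Char) (tl : List (List Char)) (hs : mySplit l = hd :: tl) :
    PySem.Chars.splitOn.go ['"'] fuel l cur acc = acc.reverse ++ (cur.reverse ++ hd) :: tl := by
  induction fuel generalizing l cur acc hd tl with
  | zero =>
    have hl : l = [] := by simpa using h
    subst hl
    rw [mySplit] at hs
    injection hs with h1 h2
    subst h1; subst h2
    simp [PySem.Chars.splitOn.go]
  | succ f ih =>
    cases l with
    | nil =>
      rw [mySplit] at hs
      injection hs with h1 h2
      subst h1; subst h2
      simp [PySem.Chars.splitOn.go]
    | cons c rest =>
      have hrest : rest.length ≤ f := by simp at h; omega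
      by_cases hc : c = '"'
      · subst hc
        have hpre : List.isPrefixOf ['"'] ('"' :: rest) = true := by
          simp [List.isPrefixOf]
        rw [mySplit] at hs
        rw [if_pos rfl] at hs
        injection hs with h1 h2
        subst h1
        rcases hr : mySplit rest with _ | ⟨h₁, tl₁⟩
        · exact absurd hr (mySplit_ne_nil rest)
        rw [hr] at h2; subst h2
        rw [PySem.Chars.splitOn.go]
        simp only [hpre, if_true]
        have := ih rest [] (cur.reverse :: acc) hrest h₁ tl₁ hr
        simp only [List.length_cons, List.length_nil] at this ⊢
        simpa using this
      · have hpre : List.isPrefixOf ['"'] (c :: rest) = false := by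
          simp [List.isPrefixOf]
          exact fun hcc => absurd hcc.symm hc
        rw [mySplit] at hs
        rw [if_neg hc] at hs
        rcases hr : mySplit rest with _ | ⟨h₁, tl₁⟩
        · exact absurd hr (mySplit_ne_nil rest)
        rw [hr] at hs
        injection hs with h1 h2
        subst h1; subst h2
        rw [PySem.Chars.splitOn.go]
        simp only [hpre, Bool.false_eq_true, if_false]
        have := ih rest (c :: cur) acc hrest h₁ tl₁ hr
        simpa using this

lemma splitOn_eq (t : List Char) : PySem.Chars.splitOn t ['"'] = mySplit t := by
  rcases hs : mySplit t with _ | ⟨hd, tl⟩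
  · exact absurd hs (mySplit_ne_nil t)
  · rw [PySem.Chars.splitOn, go_eq (t.length + 1) t [] [] (by omega) hd tl hs]
    simp

lemma join_cons_head (c : Char) (h : List Char) (L : List (List Char)) :
    PySem.Chars.join ['"'] ((c :: h) :: L) = c :: PySem.Chars.join ['"'] (h :: L) := by
  cases L with
  | nil => simp [PySem.Chars.join_singleton]
  | cons q rest => rw [PySem.Chars.join_cons_cons, PySem.Chars.join_cons_cons]; simp

lemma join_mySplit (t : List Char) : PySem.Chars.join ['"'] (mySplit t) = t := by
  induction t with
  | nil => simp [mySplit, PySem.Chars.join_singleton]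
  | cons c r ih =>
    unfold mySplit
    split_ifs with hc
    · subst hc
      rcases hr : mySplit r with _ | ⟨h₁, tl₁⟩
      · exact absurd hr (mySplit_ne_nil r)
      · rw [PySem.Chars.join_cons_cons]
        rw [hr] at ih
        simp [ih]
    · rcases hr : mySplit r with _ | ⟨h₁, tl₁⟩
      · exact absurd hr (mySplit_ne_nil r)
      · rw [join_cons_head]
        rw [hr] at ih
        simp [ih]

-- the splice at the (n+1)-st quote, expressed by split segments
lemma key_lemma (t : List Char) (n : Nat) (hn : n < (qpos t).length) :
    PySem.Chars.join ['"'] ((mySplit t).take (n + 1)) ++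
      '\'' :: PySem.Chars.join ['"'] ((mySplit t).drop (n + 1))
    = t.take ((qpos t).getD n 0) ++ '\'' :: t.drop ((qpos t).getD n 0 + 1) := by
  induction t generalizing n with
  | nil => simp [qpos] at hn
  | cons c r ih =>
    rcases hr : mySplit r with _ | ⟨h₁, tl₁⟩
    · exact absurd hr (mySplit_ne_nil r)
    by_cases hc : c = '"'
    · subst hc
      rw [mySplit, if_pos rfl, hr]
      rw [qpos, if_pos rfl] at hn ⊢
      cases n with
      | zero =>
        have hj : PySem.Chars.join ['"'] (mySplit r) = r := join_mySplit r
        rw [hr] at hj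
        simp [PySem.Chars.join_singleton, hj]
      | succ m =>
        have hm : m < (qpos r).length := by simpa using hn
        have hgd : ((0 :: (qpos r).map (· + 1)).getD (m + 1) 0) = (qpos r).getD m 0 + 1 := by
          rw [List.getD_cons_succ, List.getD_eq_getElem _ _ (by simpa using hm),
            List.getElem_map, List.getD_eq_getElem _ _ hm]
        rw [hgd]
        have := ih m hm
        rw [hr] at this
        rw [List.take_succ_cons, List.drop_succ_cons] at this
        rw [List.take_succ_cons, List.take_succ_cons, PySem.Chars.join_cons_cons,
          List.drop_succ_cons, List.drop_succ_cons]
        simp only [List.nil_append, List.cons_append]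
        rw [this]
        simp
    · rw [mySplit, if_neg hc, hr]
      rw [qpos, if_neg hc] at hn ⊢
      have hm : n < (qpos r).length := by simpa using hn
      have hgd : (((qpos r).map (· + 1)).getD n 0) = (qpos r).getD n 0 + 1 := by
        rw [List.getD_eq_getElem _ _ (by simpa using hm), List.getElem_map,
          List.getD_eq_getElem _ _ hm]
      rw [hgd]
      have := ih n hm
      rw [hr] at this
      rw [List.take_succ_cons, List.drop_succ_cons, join_cons_head]
      rw [List.take_succ_cons, List.drop_succ_cons] at this
      simp only [List.cons_append]
      rw [this]
      simp

-- A's filtered index list equals the shifted quote positions of the tail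
lemma filt_eq (cs : List Char) (a : Int) (h0 : 0 ≤ a) (hle : a.toNat ≤ cs.length) :
    (PySem.List.pyRange a cs.length 1).filter (fun i => PySem.List.pyGet? cs i == some '"')
      = (qpos (cs.drop a.toNat)).map (fun (p : Nat) => a + (p : Int)) := by
  induction hn : cs.length - a.toNat generalizing a with
  | zero =>
    have hge : (cs.length : Int) ≤ a := by omega
    rw [PySem.List.pyRange_one_eq_nil hge, List.drop_eq_nil_of_le (by omega)]
    simp [qpos]
  | succ m ih =>
    have hlt : a.toNat < cs.length := by omega
    have halt : a < (cs.length : Int) := by omega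
    rw [PySem.List.pyRange_one_cons halt, List.drop_eq_getElem_cons hlt]
    have hget : PySem.List.pyGet? cs a = some cs[a.toNat] := by
      rw [PySem.List.pyGet?_of_nonneg_of_lt cs h0 halt, List.getElem?_eq_getElem hlt]
    have ha1 : (a + 1).toNat = a.toNat + 1 := by omega
    have hrec := ih (a + 1) (by omega) (by omega) (by omega)
    rw [ha1] at hrec
    rw [List.filter_cons, hrec]
    by_cases hc : cs[a.toNat] = '"'
    · rw [qpos, if_pos hc]
      simp only [hget, hc, beq_self_eq_true, if_true]
      rw [List.map_cons, List.map_map]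
      refine congrArg₂ List.cons (by simp) ?_
      exact List.map_congr_left fun p _ => by simp only [Function.comp_apply]; push_cast; omega
    · rw [qpos, if_neg hc]
      have : (PySem.List.pyGet? cs a == some '\u0022') = false := by
        simp [hget, hc]
      simp only [this, Bool.false_eq_true, if_false]
      rw [List.map_map]
      exact List.map_congr_left fun p _ => by simp only [Function.comp_apply]; push_cast; omega

-- A's early-returning counting scan, characterised by the filtered position list.
lemma pvGoA_eq (cs : List Char) (orig : String) (idxs : List Int) (qc ith : Int) :
    pvGoA cs orig idxs qc ith =
      (if qc < ith ∧ ith ≤ qc + ((idxs.filter (fun i => PySem.List.pyGet? cs i == some '"')).length : Int) then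
        (let j := (idxs.filter (fun i => PySem.List.pyGet? cs i == some '"')).getD (ith - qc - 1).toNat 0
         String.ofList (PySem.List.slice cs none (some j) ++ ['\''] ++ PySem.List.slice cs (some (j + 1)) none))
      else orig) := by
  induction idxs generalizing qc with
  | nil => simp [pvGoA]
  | cons i rest ih =>
    by_cases hq : (PySem.List.pyGet? cs i == some '"') = true
    · by_cases hit : qc + 1 = ith
      · have hfil : (i :: rest).filter (fun i => PySem.List.pyGet? cs i == some '"')
            = i :: rest.filter (fun i => PySem.List.pyGet? cs i == some '"') := by
          simp [hq]
        rw [pvGoA, hfil]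
        simp only [hq, if_true, if_pos hit]
        have hcond : qc < ith ∧
            ith ≤ qc + ((i :: rest.filter (fun i => PySem.List.pyGet? cs i == some '"')).length : Int) := by
          simp; omega
        rw [if_pos hcond]
        have h0 : (ith - qc - 1).toNat = 0 := by omega
        simp [h0]
      · rw [pvGoA]
        simp only [hq, if_true, if_neg hit]
        rw [ih (qc + 1)]
        have hfil : (i :: rest).filter (fun i => PySem.List.pyGet? cs i == some '"')
            = i :: rest.filter (fun i => PySem.List.pyGet? cs i == some '"') := by
          simp [hq]
        rw [hfil]
        set ps := rest.filter (fun i => PySem.List.pyGet? cs i == some '"') with hps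
        by_cases hc : qc + 1 < ith ∧ ith ≤ qc + 1 + (ps.length : Int)
        · have hc' : qc < ith ∧ ith ≤ qc + ((i :: ps).length : Int) := by
            simp; omega
          rw [if_pos hc, if_pos hc']
          have h1 : (ith - qc - 1).toNat = (ith - (qc + 1) - 1).toNat + 1 := by omega
          simp [h1]
        · have hc' : ¬ (qc < ith ∧ ith ≤ qc + ((i :: ps).length : Int)) := by
            simp; intro h; simp at hc; omega
          rw [if_neg hc, if_neg hc']
    · rw [pvGoA]
      simp only [hq, Bool.false_eq_true, if_false]
      rw [ih qc]
      have hfil : (i :: rest).filter (fun i => PySem.List.pyGet? cs i == some '"')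
          = rest.filter (fun i => PySem.List.pyGet? cs i == some '"') := by
        simp [hq]
      rw [hfil]

-- ===== VERDICT =====
theorem replace_ith_quote_after_keyword_spec : Claim_equal_replace_ith_quote_after_keyword := by
  intro s k ith _
  unfold Spec_replace_ith_quote_after_keyword
  unfold replace_ith_quote_after_keyword replace_ith_quote_after_keyword_alt
  simp only [PySem.Str.find_eq]
  by_cases hk : PySem.Chars.find s.toList k.toList = -1
  · rw [if_pos hk, if_pos hk]
  · rw [if_neg hk, if_neg hk, pvGoA_eq]
    set cs := s.toList with hcs
    set kp := PySem.Chars.find cs k.toList with hkp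
    have h0 : 0 ≤ kp :=
      (PySem.Chars.find_nonneg_iff cs k.toList).2 ((PySem.Chars.find_ne_neg_one_iff cs k.toList).1 hk)
    have hle : kp ≤ (cs.length : Int) := PySem.Chars.find_le_length cs k.toList
    have hleN : kp.toNat ≤ cs.length := by omega
    rw [filt_eq cs kp h0 hleN, PySem.List.slice_from cs h0, PySem.List.slice_to cs h0,
      splitOn_eq]
    set tl := cs.drop kp.toNat with htl
    have hlen : (mySplit tl).length = (qpos tl).length + 1 := mySplit_length tl
    by_cases hc : 1 ≤ ith ∧ ith ≤ ((qpos tl).length : Int)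
    · have hA : 0 < ith ∧ ith ≤ 0 + (((qpos tl).map (fun (p : Nat) => kp + (p : Int))).length : Int) := by
        simp only [List.length_map]; omega
      have hB : 1 ≤ ith ∧ ith ≤ ((mySplit tl).length : Int) - 1 := by
        rw [hlen]; push_cast; omega
      rw [if_pos hA, if_pos hB]
      set n := (ith - 0 - 1).toNat with hn
      have hnlt : n < (qpos tl).length := by omega
      have hj : ((qpos tl).map (fun (p : Nat) => kp + (p : Int))).getD n 0
          = kp + ((qpos tl).getD n 0 : Int) := by
        rw [List.getD_eq_getElem _ _ (by simpa using hnlt), List.getElem_map,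
          List.getD_eq_getElem _ _ hnlt]
      simp only [hj]
      set q := (qpos tl).getD n 0 with hq
      have hj0 : (0:Int) ≤ kp + (q : Int) := by omega
      have hj1 : (0:Int) ≤ kp + (q : Int) + 1 := by omega
      rw [PySem.List.slice_to cs hj0, PySem.List.slice_from cs hj1]
      have hT : (kp + (q : Int)).toNat = kp.toNat + q := by omega
      have hD : (kp + (q : Int) + 1).toNat = kp.toNat + (q + 1) := by omega
      rw [hT, hD, List.take_add, ← htl, ← List.drop_drop, ← htl]
      have hith0 : 0 ≤ ith := by omega
      rw [PySem.List.slice_to _ hith0, PySem.List.slice_from _ hith0]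
      have hithn : ith.toNat = n + 1 := by omega
      rw [hithn]
      have hkl := key_lemma tl n hnlt
      rw [← hq] at hkl
      simp [List.append_assoc, hkl]
    · have hA : ¬ (0 < ith ∧ ith ≤ 0 + (((qpos tl).map (fun (p : Nat) => kp + (p : Int))).length : Int)) := by
        simp only [List.length_map]; omega
      have hB : ¬ (1 ≤ ith ∧ ith ≤ ((mySplit tl).length : Int) - 1) := by
        rw [hlen]; push_cast; omega
      rw [if_neg hA, if_neg hB]
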